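-- pv_equiv track=rewrite | github.com/devqueue/CGMdashwebapp | src/dashapp/dataprocessor.py | rearranage_columns
-- ===== SOURCE A (Python) =====
-- import collections.abc as abc
--
-- def rearranage_columns(columns):
--
--     def rearrange(seq, order, keyfunc):
--         if not isinstance(order, abc.Mapping):
--             order = {v: i for i, v in enumerate(order)}
--         return sorted(seq, key=lambda x: order[keyfunc(x)])
--
--     months = ['January', 'February', 'March', 'April', 'May', 'June', 'July',
--               'August', 'September', 'October', 'November', 'December']
--
--     def get_month_name(column_name):
--         return column_name.split(' ')[0]
--
--     rearranged_list = rearrange(columns, months, get_month_name)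
--
--     return rearranged_list
-- ===== SOURCE B (Python) =====
-- def rearranage_columns(columns):
--     months = ['January', 'February', 'March', 'April', 'May', 'June', 'July',
--               'August', 'September', 'October', 'November', 'December']
--     buckets = [[] for _ in months]
--     for column in columns:
--         buckets[months.index(column.split(' ')[0])].append(column)
--     out = []
--     for bucket in buckets:
--         out.extend(bucket)
--     return out
-- ===== Notes on version B (the rewrite author's own statement) =====
-- stated objective: alternative
-- what changed: Replaces the comparison sort keyed through a month-index dict by a single-pass stable bucket sort: each column goes into one of 12 month buckets found with months.index, and the buckets are concatenated in calendar order.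
import Mathlib
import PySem

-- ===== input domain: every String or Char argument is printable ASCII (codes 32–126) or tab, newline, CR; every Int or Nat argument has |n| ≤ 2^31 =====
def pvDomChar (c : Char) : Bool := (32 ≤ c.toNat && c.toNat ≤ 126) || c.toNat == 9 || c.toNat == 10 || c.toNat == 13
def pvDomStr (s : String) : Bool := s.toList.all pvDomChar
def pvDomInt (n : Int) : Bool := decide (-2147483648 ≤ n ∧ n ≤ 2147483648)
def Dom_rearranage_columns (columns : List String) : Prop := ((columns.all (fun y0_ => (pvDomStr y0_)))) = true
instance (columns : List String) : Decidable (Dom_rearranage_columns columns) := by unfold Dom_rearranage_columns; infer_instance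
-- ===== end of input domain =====

-- B replaces A's comparison sort (sorted with a month-index dict key) by a single-pass
-- stable bucket sort: 12 month buckets filled in one pass (bucket found by months.index),
-- then concatenated in calendar order (objective: alternative algorithm).

-- ===== PORT A =====
def pvMonths : List String := ["January", "February", "March", "April", "May", "June",
  "July", "August", "September", "October", "November", "December"]

-- column_name.split(' ')[0]: split? with a nonempty separator is always `some` of a
-- nonempty list, so the getD/headD defaults are never used — exact.
def pvGetMonthName (column_name : String) : String :=
  ((PySem.Str.split? column_name " ").getD []).headD ""

-- order = {v: i for i, v in enumerate(months)}
def pvOrder : PySem.Dict String Int :=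
  (PySem.List.enumerate pvMonths).foldl (fun d p => d.insert p.2 p.1) PySem.Dict.empty

-- lambda x: order[keyfunc(x)] — a missing month is a KeyError in Python, excluded by
-- Pre_rearranage_columns; inside Pre_ the getD default is never used.
def pvKey (x : String) : Int := pvOrder.getD (pvGetMonthName x) 0

def rearranage_columns (columns : List String) : List String :=
  PySem.List.sorted columns pvKey

-- ===== PORT B =====
def pvMonthNames : List String := ["January", "February", "March", "April", "May", "June",
  "July", "August", "September", "October", "November", "December"]

-- months.index(column.split(' ')[0]) — an unknown month is a ValueError in Python,
-- excluded by Pre_rearranage_columns; inside Pre_ the getD default is never used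
-- (same exact-ness note for split(' ')[0] as on the A side).
def pvMonthIdx (column : String) : Int :=
  ((PySem.List.index? pvMonthNames (((PySem.Str.split? column " ").getD []).headD "")).getD 0 : Nat)

def rearranage_columns_alt (columns : List String) : List String :=
  let buckets := columns.foldl (fun buckets column =>
    PySem.List.pySetD buckets (pvMonthIdx column)
      (PySem.List.pyGetD buckets (pvMonthIdx column) [] ++ [column]))
    (pvMonthNames.map (fun _ => ([] : List String)))
  buckets.foldl (fun out bucket => out ++ bucket) []

-- ===== PRECONDITION & SPEC =====
-- Pre_ excludes exactly the inputs on which A raises KeyError: a column whose first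
-- space-separated word is not one of the 12 month names (B raises ValueError there).
def Pre_rearranage_columns (columns : List String) : Prop :=
  ∀ c ∈ columns, pvGetMonthName c ∈ pvMonths

instance (columns : List String) : Decidable (Pre_rearranage_columns columns) := by
  unfold Pre_rearranage_columns; infer_instance

def pvWitness_rearranage_columns : List String :=
  ["March 2020", "January avg", "March", "February 1"]

def Spec_rearranage_columns (columns : List String) (out : List String) : Prop :=
  out = rearranage_columns_alt columns

instance (columns : List String) (out : List String) : Decidable (Spec_rearranage_columns columns out) := by
  unfold Spec_rearranage_columns; infer_instance

-- ===== CLAIM (what is proved, stated in full; the proofs are below) =====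
def Claim_equal_rearranage_columns : Prop := ∀ (columns : List String), Dom_rearranage_columns columns → Pre_rearranage_columns columns → Spec_rearranage_columns columns (rearranage_columns columns)

-- ===== LEMMAS AND PROOFS =====

-- `pvFb k p n` = the columns of p with key 0, then key 1, …, then key (n-1), in order.
def pvFb {α : Type} (k : α → Int) (p : List α) : Nat → List α
  | 0 => []
  | m+1 => pvFb k p m ++ p.filter (fun c => decide (k c = (m : Int)))

theorem pvFb_nil {α : Type} (k : α → Int) (n : Nat) : pvFb k ([] : List α) n = [] := by
  induction n with
  | zero => rfl
  | succ m ih => simp [pvFb, ih]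

theorem pvFb_congr {α : Type} (k1 k2 : α → Int) (p : List α) (n : Nat)
    (h : ∀ c ∈ p, k1 c = k2 c) : pvFb k1 p n = pvFb k2 p n := by
  induction n with
  | zero => rfl
  | succ m ih =>
    simp only [pvFb, ih]
    congr 1
    exact List.filter_congr (fun c hc => by rw [h c hc])

theorem pvFb_mem_lt {α : Type} (k : α → Int) (p : List α) (m : Nat) :
    ∀ y ∈ pvFb k p m, k y < m := by
  induction m with
  | zero => intro y hy; simp [pvFb] at hy
  | succ m ih =>
    intro y hy
    simp only [pvFb, List.mem_append, List.mem_filter] at hy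
    rcases hy with hy | ⟨_, hy⟩
    · have := ih y hy; push_cast; omega
    · have : k y = (m : Int) := by simpa using hy
      push_cast; omega

theorem pvFb_append_le {α : Type} (k : α → Int) (p : List α) (c : α) (m : Nat)
    (h : (m : Int) ≤ k c) : pvFb k (p ++ [c]) m = pvFb k p m := by
  induction m with
  | zero => rfl
  | succ m ih =>
    have hm : (m : Int) ≤ k c := by push_cast at h ⊢; omega
    have hne : ¬ (k c = (m : Int)) := by push_cast at h; omega
    simp [pvFb, ih hm, List.filter_append, hne]

theorem pv_insertBy_append_all_before {α : Type} (bf : α → α → Bool) (c : α)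
    (l1 l2 : List α) (h2 : ∀ y ∈ l2, bf c y = true) :
    PySem.List.insertBy bf c (l1 ++ l2) = PySem.List.insertBy bf c l1 ++ l2 := by
  induction l1 with
  | nil =>
    cases l2 with
    | nil => rfl
    | cons y ys =>
      have : bf c y = true := h2 y (by simp)
      show PySem.List.insertBy bf c (y :: ys) = [c] ++ y :: ys
      rw [show PySem.List.insertBy bf c (y :: ys)
            = if bf c y then c :: y :: ys else y :: PySem.List.insertBy bf c ys from rfl]
      simp [this]
  | cons a l1 ih =>
    show PySem.List.insertBy bf c (a :: (l1 ++ l2)) = PySem.List.insertBy bf c (a :: l1) ++ l2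
    rw [show PySem.List.insertBy bf c (a :: (l1 ++ l2))
          = if bf c a then c :: a :: (l1 ++ l2) else a :: PySem.List.insertBy bf c (l1 ++ l2) from rfl,
        show PySem.List.insertBy bf c (a :: l1)
          = if bf c a then c :: a :: l1 else a :: PySem.List.insertBy bf c l1 from rfl]
    by_cases h : bf c a <;> simp [h, ih]

-- inserting c into pvFb k p n puts it at the end of its own bucket
theorem pv_insertBy_pvFb {α : Type} (k : α → Int) (p : List α) (c : α) (n : Nat)
    (h0 : 0 ≤ k c) (h1 : k c < n) :
    PySem.List.insertBy (fun a b => decide (k a < k b)) c (pvFb k p n) = pvFb k (p ++ [c]) n := by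
  induction n with
  | zero => exact absurd h1 (by push_cast; omega)
  | succ m ih =>
    by_cases hm : k c = (m : Int)
    · have hall : ∀ y ∈ pvFb k p (m+1), (fun a b => decide (k a < k b)) c y = false := by
        intro y hy
        simp only [pvFb, List.mem_append, List.mem_filter] at hy
        rcases hy with hy | ⟨_, hy⟩
        · have := pvFb_mem_lt k p m y hy; simp; omega
        · have : k y = (m : Int) := by simpa using hy
          simp; omega
      rw [PySem.List.insertBy_of_forall_not_before _ _ _ hall]
      have hle : (m : Int) ≤ k c := by omega
      simp [pvFb, pvFb_append_le k p c m hle, List.filter_append, hm]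
    · have hlt : k c < (m : Int) := by push_cast at h1; omega
      have h2 : ∀ y ∈ p.filter (fun c => decide (k c = (m : Int))),
          (fun a b => decide (k a < k b)) c y = true := by
        intro y hy
        have : k y = (m : Int) := by simpa using (List.mem_filter.mp hy).2
        simp; omega
      rw [show pvFb k p (m+1) = pvFb k p m ++ p.filter (fun c => decide (k c = (m : Int))) from rfl,
          pv_insertBy_append_all_before _ c _ _ h2, ih hlt]
      simp [pvFb, List.filter_append, hm]

theorem pv_foldl_insertBy_pvFb {α : Type} (k : α → Int) (n : Nat) :
    ∀ (xs p : List α), (∀ c ∈ xs, 0 ≤ k c ∧ k c < n) →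
      xs.foldl (fun acc x => PySem.List.insertBy (fun a b => decide (k a < k b)) x acc)
        (pvFb k p n) = pvFb k (p ++ xs) n := by
  intro xs
  induction xs with
  | nil => intro p _; simp
  | cons c xs ih =>
    intro p h
    have hc := h c (by simp)
    rw [List.foldl_cons, pv_insertBy_pvFb k p c n hc.1 hc.2,
        ih (p ++ [c]) (fun x hx => h x (by simp [hx]))]
    simp

theorem pv_sorted_eq_pvFb {α : Type} [DecidableEq α] (k : α → Int) (n : Nat) (xs : List α)
    (h : ∀ c ∈ xs, 0 ≤ k c ∧ k c < n) :
    PySem.List.sorted xs k = pvFb k xs n := by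
  rw [PySem.List.sorted_eq_foldl_insertBy]
  have := pv_foldl_insertBy_pvFb k n xs [] h
  rw [pvFb_nil] at this
  simpa using this

theorem pv_key_bound (c : String) (h : pvGetMonthName c ∈ pvMonths) :
    0 ≤ pvKey c ∧ pvKey c < 12 := by
  unfold pvKey
  simp only [pvMonths, List.mem_cons, List.not_mem_nil, or_false] at h
  rcases h with h | h | h | h | h | h | h | h | h | h | h | h <;> rw [h] <;> decide

-- on a column whose first word is a month name, B's months.index agrees with A's dict key
theorem pv_idx_eq_key (c : String) (h : pvGetMonthName c ∈ pvMonths) :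
    pvMonthIdx c = pvKey c := by
  have hfw : pvMonthIdx c
      = ((PySem.List.index? pvMonthNames (pvGetMonthName c)).getD 0 : Nat) := rfl
  rw [hfw]
  unfold pvKey
  simp only [pvMonths, List.mem_cons, List.not_mem_nil, or_false] at h
  rcases h with h | h | h | h | h | h | h | h | h | h | h | h <;> rw [h] <;> decide

-- ===== B-side lemmas (the bucket pass) =====

theorem pv_foldl_upd_length {α : Type} (k : α → Int) (xs : List α) (bs : List (List α)) :
    (xs.foldl (fun bs c => PySem.List.pySetD bs (k c)
        (PySem.List.pyGetD bs (k c) [] ++ [c])) bs).length = bs.length := by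
  induction xs generalizing bs with
  | nil => rfl
  | cons c xs ih => simp [List.foldl_cons, ih, PySem.List.length_pySetD]

theorem pv_foldl_upd_get {α : Type} (k : α → Int) (n : Nat) (xs : List α) :
    ∀ (bs : List (List α)), bs.length = n → (∀ c ∈ xs, 0 ≤ k c ∧ k c < n) →
      ∀ j : Nat, j < n →
        PySem.List.pyGetD (xs.foldl (fun bs c => PySem.List.pySetD bs (k c)
            (PySem.List.pyGetD bs (k c) [] ++ [c])) bs) (j : Int) []
          = PySem.List.pyGetD bs (j : Int) [] ++ xs.filter (fun c => decide (k c = (j : Int))) := by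
  induction xs with
  | nil => intro bs _ _ j _; simp
  | cons c xs ih =>
    intro bs hlen h j hj
    have hc := h c (by simp)
    have hknat : ((k c).toNat : Int) = k c := by omega
    have hklt : (k c).toNat < bs.length := by omega
    rw [List.foldl_cons]
    have hstep : PySem.List.pyGetD (PySem.List.pySetD bs (k c)
        (PySem.List.pyGetD bs (k c) [] ++ [c])) (j : Int) []
        = if j = (k c).toNat then PySem.List.pyGetD bs (k c) [] ++ [c]
          else PySem.List.pyGetD bs (j : Int) [] := by
      rw [← hknat, PySem.List.pyGetD_pySetD_natCast _ _ _ _ _ hklt]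
      simp only [Int.toNat_natCast]
      rfl
    rw [ih (PySem.List.pySetD bs (k c) (PySem.List.pyGetD bs (k c) [] ++ [c]))
          (by rw [PySem.List.length_pySetD]; exact hlen)
          (fun x hx => h x (by simp [hx])) j hj, hstep]
    by_cases hjc : j = (k c).toNat
    · have hkj : k c = (j : Int) := by omega
      rw [if_pos hjc, List.filter_cons, hkj]
      simp
    · have hkj : ¬ (k c = (j : Int)) := by omega
      rw [if_neg hjc, List.filter_cons]
      simp [hkj]

theorem pv_foldl_append_eq_flatten {α : Type} (bs : List (List α)) (init : List α) :
    bs.foldl (fun acc bucket => acc ++ bucket) init = init ++ bs.flatten := by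
  induction bs generalizing init with
  | nil => simp
  | cons b bs ih => simp [List.foldl_cons, ih]

theorem pv_flatten_range_filter_eq_pvFb {α : Type} (k : α → Int) (p : List α) (n : Nat) :
    ((List.range n).map (fun (j : Nat) => p.filter (fun c => decide (k c = (j : Int))))).flatten
      = pvFb k p n := by
  induction n with
  | zero => rfl
  | succ m ih => rw [List.range_succ]; simp [pvFb, ih]

theorem pv_alt_eq_pvFb (columns : List String)
    (h : ∀ c ∈ columns, 0 ≤ pvMonthIdx c ∧ pvMonthIdx c < 12) :
    rearranage_columns_alt columns = pvFb pvMonthIdx columns 12 := by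
  have hlen0 : (pvMonthNames.map (fun _ => ([] : List String))).length = 12 := by decide
  have hget : ∀ j : Nat, j < 12 →
      PySem.List.pyGetD (columns.foldl (fun bs column => PySem.List.pySetD bs (pvMonthIdx column)
        (PySem.List.pyGetD bs (pvMonthIdx column) [] ++ [column]))
        (pvMonthNames.map (fun _ => ([] : List String)))) (j : Int) []
      = columns.filter (fun c => decide (pvMonthIdx c = (j : Int))) := by
    intro j hj
    rw [pv_foldl_upd_get pvMonthIdx 12 columns _ hlen0 h j hj]
    have hinit : PySem.List.pyGetD (pvMonthNames.map (fun _ => ([] : List String))) (j : Int) [] = [] := by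
      interval_cases j <;> decide
    rw [hinit]; rfl
  have hlen : (columns.foldl (fun bs column => PySem.List.pySetD bs (pvMonthIdx column)
      (PySem.List.pyGetD bs (pvMonthIdx column) [] ++ [column]))
      (pvMonthNames.map (fun _ => ([] : List String)))).length = 12 := by
    rw [pv_foldl_upd_length]; exact hlen0
  have hbseq : (columns.foldl (fun bs column => PySem.List.pySetD bs (pvMonthIdx column)
        (PySem.List.pyGetD bs (pvMonthIdx column) [] ++ [column]))
        (pvMonthNames.map (fun _ => ([] : List String))))
      = (List.range 12).map
        (fun (j : Nat) => columns.filter (fun c => decide (pvMonthIdx c = (j : Int)))) := by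
    apply List.ext_getElem
    · rw [hlen]; simp
    · intro i h1 h2
      have hi : i < 12 := by rw [hlen] at h1; exact h1
      have hgi := hget i hi
      rw [PySem.List.pyGetD_eq_getElem _ _ (by omega) (by rw [hlen]; push_cast; omega)] at hgi
      simp only [List.getElem_map, List.getElem_range]
      simpa using hgi
  unfold rearranage_columns_alt
  rw [pv_foldl_append_eq_flatten, hbseq, pv_flatten_range_filter_eq_pvFb]
  simp

-- ===== VERDICT (by name: the statement is the Claim_ definition above) =====
theorem rearranage_columns_spec : Claim_equal_rearranage_columns := by
  intro columns _ hpre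
  have hb : ∀ c ∈ columns, 0 ≤ pvKey c ∧ pvKey c < 12 :=
    fun c hc => pv_key_bound c (hpre c hc)
  have hidx : ∀ c ∈ columns, pvMonthIdx c = pvKey c :=
    fun c hc => pv_idx_eq_key c (hpre c hc)
  have hbi : ∀ c ∈ columns, 0 ≤ pvMonthIdx c ∧ pvMonthIdx c < 12 :=
    fun c hc => by rw [hidx c hc]; exact hb c hc
  unfold Spec_rearranage_columns rearranage_columns
  rw [pv_sorted_eq_pvFb pvKey 12 columns hb, pv_alt_eq_pvFb columns hbi,
      pvFb_congr pvMonthIdx pvKey columns 12 hidx]
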